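-- pv_equiv track=rewrite | github.com/aadelb/loom | src/loom/tools/safety_predictor.py | _estimate_current_stage
-- ===== SOURCE A (Python) =====
-- from typing import Any
--
-- DEFENSE_PIPELINE: list[dict[str, Any]] = [
--     {
--         "stage": 1,
--         "category": "Keyword Filters",
--         "defenses": ["basic_keyword", "content_filter"],
--         "effectiveness_range": (0.45, 0.65),
--         "typical_lifetime_months": 6,
--     },
--     {
--         "stage": 2,
--         "category": "Classifiers",
--         "defenses": ["classifier", "policy_layer", "classifiers"],
--         "effectiveness_range": (0.65, 0.80),
--         "typical_lifetime_months": 12,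
--     },
--     {
--         "stage": 3,
--         "category": "Constitutional/Reasoning",
--         "defenses": ["constitutional_AI", "reasoning_filters", "instruction_hierarchy"],
--         "effectiveness_range": (0.72, 0.85),
--         "typical_lifetime_months": 18,
--     },
--     {
--         "stage": 4,
--         "category": "Adaptive Reasoning",
--         "defenses": ["reasoning_trace_audit", "adaptive_assessment", "dynamic_constraint"],
--         "effectiveness_range": (0.80, 0.92),
--         "typical_lifetime_months": 24,
--     },
-- ]
--
-- def _estimate_current_stage(current_defenses: list[str]) -> int:
--     """Estimate current defense pipeline stage."""
--     if not current_defenses: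
--         return 0
--
--     for pipeline_stage in reversed(DEFENSE_PIPELINE):
--         for defense in current_defenses:
--             if defense in pipeline_stage["defenses"]:
--                 return pipeline_stage["stage"]
--
--     return 0
-- ===== SOURCE B (Python) =====
-- from typing import Any
--
-- DEFENSE_PIPELINE: list[dict[str, Any]] = [
--     {
--         "stage": 1,
--         "category": "Keyword Filters",
--         "defenses": ["basic_keyword", "content_filter"],
--         "effectiveness_range": (0.45, 0.65),
--         "typical_lifetime_months": 6,
--     },
--     {
--         "stage": 2,
--         "category": "Classifiers",
--         "defenses": ["classifier", "policy_layer", "classifiers"],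
--         "effectiveness_range": (0.65, 0.80),
--         "typical_lifetime_months": 12,
--     },
--     {
--         "stage": 3,
--         "category": "Constitutional/Reasoning",
--         "defenses": ["constitutional_AI", "reasoning_filters", "instruction_hierarchy"],
--         "effectiveness_range": (0.72, 0.85),
--         "typical_lifetime_months": 18,
--     },
--     {
--         "stage": 4,
--         "category": "Adaptive Reasoning",
--         "defenses": ["reasoning_trace_audit", "adaptive_assessment", "dynamic_constraint"],
--         "effectiveness_range": (0.80, 0.92),
--         "typical_lifetime_months": 24,
--     },
-- ]
--
-- # Index each defense name by its (unique) stage, built once.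
-- _STAGE_INDEX: dict[str, int] = {
--     defense: stage["stage"]
--     for stage in DEFENSE_PIPELINE
--     for defense in stage["defenses"]
-- }
--
--
-- def _estimate_current_stage(current_defenses: list[str]) -> int:
--     """Estimate current defense pipeline stage."""
--     if not current_defenses:
--         return 0
--     return max(_STAGE_INDEX.get(d, 0) for d in current_defenses)
-- ===== Notes on version B (the rewrite author's own statement) =====
-- stated objective: simpler
-- what changed: Replaces A's reversed outer loop over pipeline stages with a nested early-return scan of the input by a defense->stage dict built once from the pipeline and a single max-aggregation pass over the input (default 0 for unknown defenses).
import Mathlib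
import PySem

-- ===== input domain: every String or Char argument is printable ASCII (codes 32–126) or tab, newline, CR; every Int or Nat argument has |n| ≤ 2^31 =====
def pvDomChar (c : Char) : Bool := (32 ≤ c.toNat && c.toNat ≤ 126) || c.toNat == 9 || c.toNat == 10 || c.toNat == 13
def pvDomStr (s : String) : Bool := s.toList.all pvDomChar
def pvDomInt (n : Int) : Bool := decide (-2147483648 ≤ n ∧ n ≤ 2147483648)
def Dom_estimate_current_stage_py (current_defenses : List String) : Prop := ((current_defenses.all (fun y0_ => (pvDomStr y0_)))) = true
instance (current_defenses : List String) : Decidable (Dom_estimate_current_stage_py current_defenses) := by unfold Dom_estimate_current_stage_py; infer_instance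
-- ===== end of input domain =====

-- B replaces A's reversed nested-scan with early return by a prebuilt defense→stage
-- index and a single max-aggregation over the input (objective: simpler).

-- ===== PORT A =====
-- DEFENSE_PIPELINE, kept to the fields A reads: (stage, defenses)
def pvPipelineA : List (Int × List String) :=
  [ (1, ["basic_keyword", "content_filter"]),
    (2, ["classifier", "policy_layer", "classifiers"]),
    (3, ["constitutional_AI", "reasoning_filters", "instruction_hierarchy"]),
    (4, ["reasoning_trace_audit", "adaptive_assessment", "dynamic_constraint"]) ]

-- inner 'for defense in current_defenses: if defense in stage["defenses"]: return stage'
def pvInnerA (cds : List String) (defs : List String) : Bool :=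
  match cds with
  | [] => false
  | d :: t => if defs.contains d then true else pvInnerA t defs

-- outer 'for pipeline_stage in reversed(DEFENSE_PIPELINE): … return 0'
def pvOuterA (stages : List (Int × List String)) (cds : List String) : Int :=
  match stages with
  | [] => 0
  | (s, defs) :: rest => if pvInnerA cds defs then s else pvOuterA rest cds

def estimate_current_stage_py (current_defenses : List String) : Int :=
  if current_defenses = [] then 0
  else pvOuterA pvPipelineA.reverse current_defenses

-- ===== PORT B =====
def pvPipelineB : List (Int × List String) :=
  [ (1, ["basic_keyword", "content_filter"]),
    (2, ["classifier", "policy_layer", "classifiers"]),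
    (3, ["constitutional_AI", "reasoning_filters", "instruction_hierarchy"]),
    (4, ["reasoning_trace_audit", "adaptive_assessment", "dynamic_constraint"]) ]

-- _STAGE_INDEX: dict comprehension over the pipeline
def pvStageIndex : PySem.Dict String Int :=
  pvPipelineB.foldl
    (fun acc st => st.2.foldl (fun a d => a.insert d st.1) acc)
    PySem.Dict.empty

-- max(_STAGE_INDEX.get(d, 0) for d in current_defenses): Python max = first item, then fold
def estimate_current_stage_py_alt (current_defenses : List String) : Int :=
  match current_defenses.map (fun d => pvStageIndex.getD d 0) with
  | [] => 0
  | x :: xs => xs.foldl max x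

-- ===== PRECONDITION & SPEC =====
def Spec_estimate_current_stage_py (current_defenses : List String) (out : Int) : Prop := out = estimate_current_stage_py_alt current_defenses
instance (current_defenses : List String) (out : Int) : Decidable (Spec_estimate_current_stage_py current_defenses out) := by unfold Spec_estimate_current_stage_py; infer_instance

-- ===== CLAIM (what is proved, stated in full; the proofs are below) =====
def Claim_equal_estimate_current_stage_py : Prop := ∀ (current_defenses : List String), Dom_estimate_current_stage_py current_defenses → Spec_estimate_current_stage_py current_defenses (estimate_current_stage_py current_defenses)

-- ===== LEMMAS AND PROOFS =====

-- the stage B's index assigns to a single defense name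
def pvStageOf (d : String) : Int := pvStageIndex.getD d 0

lemma pvStageIndex_eq : pvStageIndex = PySem.Dict.mk
    [("basic_keyword", 1), ("content_filter", 1),
     ("classifier", 2), ("policy_layer", 2), ("classifiers", 2),
     ("constitutional_AI", 3), ("reasoning_filters", 3), ("instruction_hierarchy", 3),
     ("reasoning_trace_audit", 4), ("adaptive_assessment", 4), ("dynamic_constraint", 4)] := by
  decide

lemma pvStageOf_eq (d : String) :
    pvStageOf d =
      if ["reasoning_trace_audit", "adaptive_assessment", "dynamic_constraint"].contains d then 4
      else if ["constitutional_AI", "reasoning_filters", "instruction_hierarchy"].contains d then 3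
      else if ["classifier", "policy_layer", "classifiers"].contains d then 2
      else if ["basic_keyword", "content_filter"].contains d then 1
      else 0 := by
  by_cases h : d ∈ ["basic_keyword", "content_filter", "classifier", "policy_layer",
      "classifiers", "constitutional_AI", "reasoning_filters", "instruction_hierarchy",
      "reasoning_trace_audit", "adaptive_assessment", "dynamic_constraint"]
  · simp only [List.mem_cons, List.not_mem_nil, or_false] at h
    rcases h with rfl | rfl | rfl | rfl | rfl | rfl | rfl | rfl | rfl | rfl | rfl <;> decide
  · simp only [List.mem_cons, List.not_mem_nil, or_false, not_or] at h
    obtain ⟨n1, n2, n3, n4, n5, n6, n7, n8, n9, n10, n11⟩ := h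
    simp [pvStageOf, pvStageIndex_eq, PySem.Dict.getD_eq_get?_getD,
      beq_iff_eq, n1, n2, n3, n4, n5, n6, n7, n8, n9, n10, n11,
      Ne.symm n1, Ne.symm n2, Ne.symm n3, Ne.symm n4, Ne.symm n5, Ne.symm n6,
      Ne.symm n7, Ne.symm n8, Ne.symm n9, Ne.symm n10, Ne.symm n11, PySem.Dict.get?]

lemma pvStageOf_nonneg (d : String) : 0 ≤ pvStageOf d := by
  rw [pvStageOf_eq]; split_ifs <;> norm_num

-- one inner scan over a cons decomposes as a disjunction
lemma pvInnerA_cons (d : String) (t : List String) (defs : List String) :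
    pvInnerA (d :: t) defs = (defs.contains d || pvInnerA t defs) := by
  cases h : defs.contains d <;> simp only [pvInnerA, h] <;> simp

-- the 4-stage first-match chain against the pointwise max, over arbitrary booleans
lemma pvChainMax (c4 c3 c2 c1 b4 b3 b2 b1 : Bool) :
    (if (c4 || b4 : Bool) then (4 : Int) else if c3 || b3 then 3 else
      if c2 || b2 then 2 else if c1 || b1 then 1 else 0) =
    max (if c4 then (4 : Int) else if c3 then 3 else if c2 then 2 else if c1 then 1 else 0)
        (if b4 then (4 : Int) else if b3 then 3 else if b2 then 2 else if b1 then 1 else 0) := by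
  revert c4 c3 c2 c1 b4 b3 b2 b1; decide

-- A's reversed double scan computes the max of the per-defense stages
lemma pvOuterA_eq (cds : List String) :
    pvOuterA pvPipelineA.reverse cds = (cds.map pvStageOf).foldr max 0 := by
  rw [show pvPipelineA.reverse =
      [ (4, ["reasoning_trace_audit", "adaptive_assessment", "dynamic_constraint"]),
        (3, ["constitutional_AI", "reasoning_filters", "instruction_hierarchy"]),
        (2, ["classifier", "policy_layer", "classifiers"]),
        (1, ["basic_keyword", "content_filter"]) ] from rfl]
  induction cds with
  | nil => rfl
  | cons d t ih =>
    rw [List.map_cons, List.foldr_cons, ← ih, pvStageOf_eq d]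
    simp only [pvOuterA, pvInnerA_cons]
    exact pvChainMax _ _ _ _ _ _ _ _

lemma pvFoldlMax_eq (xs : List Int) (x : Int) (hx : 0 ≤ x) (hxs : ∀ y ∈ xs, 0 ≤ y) :
    xs.foldl max x = max x (xs.foldr max 0) := by
  induction xs generalizing x with
  | nil => simp [max_eq_left hx]
  | cons y t ih =>
    rw [List.foldl_cons,
      ih (max x y) (le_trans hx (le_max_left x y))
        (fun z hz => hxs z (List.mem_cons_of_mem y hz)),
      List.foldr_cons, max_assoc]

-- ===== VERDICT (by name: the statement is the Claim_ definition above) =====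
theorem estimate_current_stage_py_spec : Claim_equal_estimate_current_stage_py := by
  intro cds _
  unfold Spec_estimate_current_stage_py estimate_current_stage_py
  cases cds with
  | nil => rfl
  | cons d t =>
    rw [if_neg (by simp), pvOuterA_eq]
    show (List.map pvStageOf (d :: t)).foldr max 0 =
      List.foldl max (pvStageOf d) (List.map pvStageOf t)
    rw [List.map_cons, List.foldr_cons,
      pvFoldlMax_eq _ _ (pvStageOf_nonneg d)
        (fun y hy => by obtain ⟨a, _, rfl⟩ := List.mem_map.mp hy; exact pvStageOf_nonneg a)]
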